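-- pv_equiv track=rewrite | github.com/itsmekhoathekid/PhonoASR | analysis/get_oov_words.py | extract_oov_words
-- ===== SOURCE A (Python) =====
-- def normalize_word(w: str) -> str:
--     # Giữ bảo thủ: không lower/punct-strip để tránh làm sai semantics.
--     return w.strip()
--
-- def extract_oov_words(train_vocab, test_data, text_key="text"):
--     oov = set()
--     for item in test_data:
--         if not isinstance(item, dict) or text_key not in item:
--             continue
--         for w in str(item[text_key]).split():
--             w = normalize_word(w)
--             if w and w not in train_vocab:
--                 oov.add(w)
--     return sorted(oov)
-- ===== SOURCE B (Python) =====
-- def normalize_word(w: str) -> str: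
--     return w.strip()
--
-- def extract_oov_words(train_vocab, test_data, text_key="text"):
--     # Stage 1: collect every normalized non-empty token (with duplicates).
--     tokens = []
--     for item in test_data:
--         if not isinstance(item, dict) or text_key not in item:
--             continue
--         for w in str(item[text_key]).split():
--             w = normalize_word(w)
--             if w:
--                 tokens.append(w)
--     # Stage 2: sort tokens and the (deduplicated) vocabulary, then subtract
--     # by a two-pointer merge over the two sorted lists; the merge skips
--     # duplicate tokens, so the result is the sorted OOV list directly.
--     tokens.sort()
--     vocab_sorted = sorted(set(train_vocab))
--     out = []
--     i = j = 0
--     n, m = len(tokens), len(vocab_sorted)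
--     while i < n:
--         t = tokens[i]
--         i += 1
--         while i < n and tokens[i] == t:
--             i += 1
--         while j < m and vocab_sorted[j] < t:
--             j += 1
--         if j == m or vocab_sorted[j] != t:
--             out.append(t)
--     return out
-- ===== Notes on version B (the rewrite author's own statement) =====
-- stated objective: alternative
-- what changed: B replaces A's per-token hash-membership filtering into a set with a sort-merge subtraction: it collects all tokens, sorts them and the deduplicated vocabulary, and produces the sorted OOV list in one two-pointer merge, with no set of results and no membership tests.
import Mathlib
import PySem

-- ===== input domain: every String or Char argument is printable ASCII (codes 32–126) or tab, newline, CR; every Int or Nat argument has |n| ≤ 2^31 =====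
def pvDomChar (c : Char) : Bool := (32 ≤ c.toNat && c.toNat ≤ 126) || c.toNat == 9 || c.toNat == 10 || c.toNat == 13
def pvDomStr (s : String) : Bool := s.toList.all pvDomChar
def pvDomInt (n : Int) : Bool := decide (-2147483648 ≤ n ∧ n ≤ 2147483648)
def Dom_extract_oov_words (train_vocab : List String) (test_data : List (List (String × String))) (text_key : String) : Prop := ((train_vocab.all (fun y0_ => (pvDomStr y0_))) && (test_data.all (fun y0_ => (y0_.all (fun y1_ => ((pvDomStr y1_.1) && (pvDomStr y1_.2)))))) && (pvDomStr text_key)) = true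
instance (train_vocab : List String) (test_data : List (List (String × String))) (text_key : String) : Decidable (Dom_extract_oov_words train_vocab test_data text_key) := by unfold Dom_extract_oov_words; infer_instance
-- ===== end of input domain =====

-- B replaces A's per-token membership filtering into a set by a sort-merge
-- subtraction: collect all tokens, sort them and the deduplicated vocabulary,
-- and emit the sorted OOV list in one duplicate-skipping two-pointer merge.

-- ===== PORT A =====
def normalize_word (w : String) : String := PySem.Str.strip w

-- 'if not isinstance(item, dict) or text_key not in item: continue' plus the
-- 'item[text_key]' lookup are the single Dict.get? match (items are dicts by
-- type, so the isinstance test always passes; str() on a str is the identity).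
def extract_oov_words (train_vocab : List String) (test_data : List (List (String × String))) (text_key : String) : List String :=
  let oov : PySem.Set String :=
    test_data.foldl (fun oov item =>
      match (PySem.Dict.mk item).get? text_key with
      | none => oov
      | some v =>
        (PySem.Str.split₀ v).foldl (fun oov w =>
          let w' := normalize_word w
          if w' ≠ "" ∧ w' ∉ train_vocab then PySem.Set.add oov w' else oov) oov)
      PySem.Set.empty
  PySem.List.sorted oov (fun x => x) false

-- ===== PORT B =====
-- the two-pointer merge loop of Source B ('while i < n: … skip equal tokens …
-- advance j past smaller vocab entries … append if no match'), with the two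
-- index-advancing inner whiles transcribed as dropWhile on the list tails
def oovMerge : List String → List String → List String
  | [], _ => []
  | t :: ts, vs =>
    let ts' := ts.dropWhile (fun x => x == t)
    let vs' := vs.dropWhile (fun v => decide (v < t))
    match vs' with
    | v :: _ => if v = t then oovMerge ts' vs' else t :: oovMerge ts' vs'
    | [] => t :: oovMerge ts' []
termination_by ts _ => ts.length
decreasing_by
  all_goals
    have h := List.length_dropWhile_le (fun x => x == t) ts
    simp only [List.length_cons]; omega

def extract_oov_words_alt (train_vocab : List String) (test_data : List (List (String × String))) (text_key : String) : List String :=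
  let tokens : List String :=
    test_data.foldl (fun acc item =>
      match (PySem.Dict.mk item).get? text_key with
      | none => acc
      | some v =>
        (PySem.Str.split₀ v).foldl (fun acc w =>
          let w' := normalize_word w
          if w' ≠ "" then acc ++ [w'] else acc) acc) []
  let tokens_sorted := PySem.List.sorted tokens (fun x => x) false
  let vocab_sorted := PySem.List.sorted (PySem.Set.ofList train_vocab) (fun x => x) false
  oovMerge tokens_sorted vocab_sorted

-- ===== PRECONDITION & SPEC =====
def Spec_extract_oov_words (train_vocab : List String) (test_data : List (List (String × String))) (text_key : String) (out : List String) : Prop := out = extract_oov_words_alt train_vocab test_data text_key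
instance (train_vocab : List String) (test_data : List (List (String × String))) (text_key : String) (out : List String) : Decidable (Spec_extract_oov_words train_vocab test_data text_key out) := by unfold Spec_extract_oov_words; infer_instance

-- ===== CLAIM (what is proved, stated in full; the proofs are below) =====
def Claim_equal_extract_oov_words : Prop := ∀ (train_vocab : List String) (test_data : List (List (String × String))) (text_key : String), Dom_extract_oov_words train_vocab test_data text_key → Spec_extract_oov_words train_vocab test_data text_key (extract_oov_words train_vocab test_data text_key)

-- ===== LEMMAS AND PROOFS =====

-- the normalized non-empty tokens of the test data, in encounter order
def pvToks (key : String) (td : List (List (String × String))) : List String :=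
  td.flatMap (fun item =>
    match (PySem.Dict.mk item).get? key with
    | none => []
    | some v => ((PySem.Str.split₀ v).map normalize_word).filter (fun w => decide (w ≠ "")))

-- A's inner and outer loops, named, with rfl step lemmas
def pvInnerA (vocab : List String) (ws : List String) (acc : PySem.Set String) : PySem.Set String :=
  ws.foldl (fun acc w =>
    let w' := normalize_word w
    if w' ≠ "" ∧ w' ∉ vocab then PySem.Set.add acc w' else acc) acc

def pvOuterA (vocab : List String) (key : String) (td : List (List (String × String))) (acc : PySem.Set String) : PySem.Set String :=
  td.foldl (fun acc item =>
    match (PySem.Dict.mk item).get? key with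
    | none => acc
    | some v => pvInnerA vocab (PySem.Str.split₀ v) acc) acc

-- B's inner and outer token-collecting loops, named
def pvInnerB (ws : List String) (acc : List String) : List String :=
  ws.foldl (fun acc w =>
    let w' := normalize_word w
    if w' ≠ "" then acc ++ [w'] else acc) acc

def pvOuterB (key : String) (td : List (List (String × String))) (acc : List String) : List String :=
  td.foldl (fun acc item =>
    match (PySem.Dict.mk item).get? key with
    | none => acc
    | some v => pvInnerB (PySem.Str.split₀ v) acc) acc

theorem pvInnerA_cons (vocab : List String) (w : String) (ws : List String) (acc : PySem.Set String) :
    pvInnerA vocab (w :: ws) acc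
      = pvInnerA vocab ws (if normalize_word w ≠ "" ∧ normalize_word w ∉ vocab then PySem.Set.add acc (normalize_word w) else acc) := rfl

theorem pvInnerB_cons (w : String) (ws : List String) (acc : List String) :
    pvInnerB (w :: ws) acc
      = pvInnerB ws (if normalize_word w ≠ "" then acc ++ [normalize_word w] else acc) := rfl

theorem pvOuterA_cons (vocab : List String) (key : String) (item : List (String × String)) (td : List (List (String × String))) (acc : PySem.Set String) :
    pvOuterA vocab key (item :: td) acc
      = pvOuterA vocab key td (match (PySem.Dict.mk item).get? key with
          | none => acc
          | some v => pvInnerA vocab (PySem.Str.split₀ v) acc) := rfl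

theorem pvOuterB_cons (key : String) (item : List (String × String)) (td : List (List (String × String))) (acc : List String) :
    pvOuterB key (item :: td) acc
      = pvOuterB key td (match (PySem.Dict.mk item).get? key with
          | none => acc
          | some v => pvInnerB (PySem.Str.split₀ v) acc) := rfl

theorem pvInnerA_mem (vocab : List String) (ws : List String) :
    ∀ (acc : PySem.Set String) (x : String),
      x ∈ pvInnerA vocab ws acc ↔
        x ∈ acc ∨ (x ∈ (ws.map normalize_word).filter (fun w => decide (w ≠ "")) ∧ x ∉ vocab) := by
  induction ws with
  | nil => intro acc x; simp [pvInnerA]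
  | cons w ws ih =>
    intro acc x
    rw [pvInnerA_cons]
    by_cases h1 : normalize_word w = ""
    · rw [if_neg (by simp [h1])]
      rw [ih acc x]
      simp [h1]
    · by_cases h2 : normalize_word w ∈ vocab
      · rw [if_neg (by tauto)]
        rw [ih acc x]
        simp only [List.map_cons, List.filter_cons, decide_eq_true_eq, if_pos h1, List.mem_cons]
        constructor
        · rintro (hx | ⟨hx, hv⟩)
          · exact Or.inl hx
          · exact Or.inr ⟨Or.inr hx, hv⟩
        · rintro (hx | ⟨rfl | hx, hv⟩)
          · exact Or.inl hx
          · exact absurd h2 hv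
          · exact Or.inr ⟨hx, hv⟩
      · rw [if_pos ⟨h1, h2⟩]
        rw [ih _ x]
        simp only [PySem.Set.mem_add, List.map_cons, List.filter_cons, decide_eq_true_eq,
          if_pos h1, List.mem_cons]
        constructor
        · rintro ((hx | rfl) | ⟨hx, hv⟩)
          · exact Or.inl hx
          · exact Or.inr ⟨Or.inl rfl, h2⟩
          · exact Or.inr ⟨Or.inr hx, hv⟩
        · rintro (hx | ⟨rfl | hx, hv⟩)
          · exact Or.inl (Or.inl hx)
          · exact Or.inl (Or.inr rfl)
          · exact Or.inr ⟨hx, hv⟩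

theorem pvOuterA_mem (vocab : List String) (key : String) (td : List (List (String × String))) :
    ∀ (acc : PySem.Set String) (x : String),
      x ∈ pvOuterA vocab key td acc ↔ x ∈ acc ∨ (x ∈ pvToks key td ∧ x ∉ vocab) := by
  induction td with
  | nil => intro acc x; simp [pvOuterA, pvToks]
  | cons item td ih =>
    intro acc x
    rw [pvOuterA_cons]
    cases hk : (PySem.Dict.mk item).get? key with
    | none =>
      rw [ih acc x]
      simp only [pvToks, List.flatMap_cons, hk, List.nil_append]
    | some v =>
      rw [ih _ x, pvInnerA_mem]
      simp only [pvToks, List.flatMap_cons, hk, List.mem_append]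
      tauto

theorem pvInnerA_nodup (vocab : List String) (ws : List String) :
    ∀ (acc : PySem.Set String), acc.Nodup → (pvInnerA vocab ws acc).Nodup := by
  induction ws with
  | nil => intro acc h; simpa [pvInnerA] using h
  | cons w ws ih =>
    intro acc h
    rw [pvInnerA_cons]
    split_ifs with h1
    · exact ih _ (PySem.Set.nodup_add _ _ h)
    · exact ih _ h

theorem pvOuterA_nodup (vocab : List String) (key : String) (td : List (List (String × String))) :
    ∀ (acc : PySem.Set String), acc.Nodup → (pvOuterA vocab key td acc).Nodup := by
  induction td with
  | nil => intro acc h; simpa [pvOuterA] using h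
  | cons item td ih =>
    intro acc h
    rw [pvOuterA_cons]
    cases hk : (PySem.Dict.mk item).get? key with
    | none => exact ih _ h
    | some v => exact ih _ (pvInnerA_nodup vocab _ _ h)

theorem pvInnerB_eq (ws : List String) :
    ∀ (acc : List String),
      pvInnerB ws acc = acc ++ (ws.map normalize_word).filter (fun w => decide (w ≠ "")) := by
  induction ws with
  | nil => intro acc; simp [pvInnerB]
  | cons w ws ih =>
    intro acc
    rw [pvInnerB_cons]
    by_cases h1 : normalize_word w = ""
    · rw [if_neg (by simp [h1]), ih]
      simp [h1]
    · rw [if_pos (by simp [h1]), ih]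
      simp [h1]

theorem pvOuterB_eq (key : String) (td : List (List (String × String))) :
    ∀ (acc : List String), pvOuterB key td acc = acc ++ pvToks key td := by
  induction td with
  | nil => intro acc; simp [pvOuterB, pvToks]
  | cons item td ih =>
    intro acc
    rw [pvOuterB_cons]
    cases hk : (PySem.Dict.mk item).get? key with
    | none =>
      rw [ih]
      simp only [pvToks, List.flatMap_cons, hk, List.nil_append]
    | some v =>
      simp only [ih, pvInnerB_eq, pvToks, List.flatMap_cons, hk, List.append_assoc]

-- the merge: on sorted inputs it is strictly increasing and computes exactly
-- the set difference of the token list and the vocabulary list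
theorem oovMerge_spec : ∀ (n : Nat) (ts vs : List String), ts.length ≤ n →
    ts.Pairwise (· ≤ ·) → vs.Pairwise (· ≤ ·) →
    (oovMerge ts vs).Pairwise (· < ·) ∧
    (∀ x, x ∈ oovMerge ts vs ↔ x ∈ ts ∧ x ∉ vs) := by
  intro n
  induction n with
  | zero =>
    intro ts vs hlen _ _
    have : ts = [] := List.eq_nil_of_length_eq_zero (Nat.le_zero.mp hlen)
    subst this
    simp [oovMerge]
  | succ n ih =>
    intro ts vs hlen hts hvs
    match ts with
    | [] => simp [oovMerge]
    | t :: ts =>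
      rw [List.pairwise_cons] at hts
      obtain ⟨htle, hts⟩ := hts
      -- facts about ts' := ts.dropWhile (· == t)
      have hts'len : (ts.dropWhile (fun x => x == t)).length ≤ n := by
        have h1 := List.length_dropWhile_le (fun x => x == t) ts
        simp only [List.length_cons] at hlen; omega
      have hts'sorted : (ts.dropWhile (fun x => x == t)).Pairwise (· ≤ ·) :=
        hts.sublist (List.dropWhile_sublist _)
      have hts'sub : ∀ x ∈ ts.dropWhile (fun x => x == t), x ∈ ts :=
        fun x hx => (List.dropWhile_sublist _).mem hx
      have hts'gt : ∀ x ∈ ts.dropWhile (fun x => x == t), t < x := by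
        intro x hx
        rcases h : ts.dropWhile (fun x => x == t) with _ | ⟨h0, rest⟩
        · rw [h] at hx; simp at hx
        · have hne : ¬ (h0 == t) = true := by
            have := List.head?_dropWhile_not (fun x => x == t) ts
            rw [h] at this; simpa using this
          have hh0 : t < h0 := lt_of_le_of_ne (htle h0 (hts'sub h0 (by rw [h]; simp)))
            (fun he => hne (by simp [he.symm]))
          rw [h] at hx
          rcases List.mem_cons.mp hx with rfl | hx
          · exact hh0
          · have hle : h0 ≤ x := by
              rw [h] at hts'sorted
              exact (List.pairwise_cons.mp hts'sorted).1 x hx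
            exact lt_of_lt_of_le hh0 hle
      have hts_mem : ∀ x, x ∈ ts → x = t ∨ x ∈ ts.dropWhile (fun x => x == t) := by
        intro x hx
        rw [← List.takeWhile_append_dropWhile (p := fun x => x == t) (l := ts)] at hx
        rcases List.mem_append.mp hx with hx | hx
        · exact Or.inl (by simpa using List.mem_takeWhile_imp hx)
        · exact Or.inr hx
      -- facts about vs' := vs.dropWhile (· < t)
      have hvs'sorted : (vs.dropWhile (fun v => decide (v < t))).Pairwise (· ≤ ·) :=
        hvs.sublist (List.dropWhile_sublist _)
      have hvs'sub : ∀ x ∈ vs.dropWhile (fun v => decide (v < t)), x ∈ vs :=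
        fun x hx => (List.dropWhile_sublist _).mem hx
      have hvs_mem_ge : ∀ x, t ≤ x → (x ∈ vs ↔ x ∈ vs.dropWhile (fun v => decide (v < t))) := by
        intro x hxt
        constructor
        · intro hx
          rw [← List.takeWhile_append_dropWhile (p := fun v => decide (v < t)) (l := vs)] at hx
          rcases List.mem_append.mp hx with hx | hx
          · have : x < t := by simpa using List.mem_takeWhile_imp hx
            exact absurd hxt (not_le.mpr this)
          · exact hx
        · exact hvs'sub x
      -- the recursive call, and the shape of a 'keep t' step
      obtain ⟨hpw, hmem⟩ := ih (ts.dropWhile (fun x => x == t)) (vs.dropWhile (fun v => decide (v < t)))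
        hts'len hts'sorted hvs'sorted
      have step : t ∉ vs.dropWhile (fun v => decide (v < t)) →
          ((t :: oovMerge (ts.dropWhile (fun x => x == t)) (vs.dropWhile (fun v => decide (v < t)))).Pairwise (· < ·) ∧
           (∀ x, x ∈ t :: oovMerge (ts.dropWhile (fun x => x == t)) (vs.dropWhile (fun v => decide (v < t))) ↔ x ∈ t :: ts ∧ x ∉ vs)) := by
        intro htnot
        constructor
        · rw [List.pairwise_cons]
          exact ⟨fun x hx => hts'gt x ((hmem x).mp hx).1, hpw⟩
        · intro x
          rw [List.mem_cons, hmem x]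
          constructor
          · rintro (rfl | ⟨hx, hnv⟩)
            · exact ⟨List.mem_cons_self, fun hxv => htnot ((hvs_mem_ge x le_rfl).mp hxv)⟩
            · exact ⟨List.mem_cons_of_mem _ (hts'sub x hx),
                fun hxv => hnv ((hvs_mem_ge x (le_of_lt (hts'gt x hx))).mp hxv)⟩
          · rintro ⟨hx, hnv⟩
            rcases List.mem_cons.mp hx with rfl | hx
            · exact Or.inl rfl
            · rcases hts_mem x hx with rfl | hx'
              · exact Or.inl rfl
              · exact Or.inr ⟨hx', fun hxv => hnv (hvs'sub x hxv)⟩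
      -- unfold one step of oovMerge, by cases on the shape of vs'
      rcases hv : vs.dropWhile (fun v => decide (v < t)) with _ | ⟨v, w⟩
      · have hunf : oovMerge (t :: ts) vs
            = t :: oovMerge (ts.dropWhile (fun x => x == t)) [] := by
          rw [oovMerge]; simp only [hv]
        rw [hunf]
        rw [hv] at step
        exact step (by simp)
      · by_cases hvt : v = t
        · have hunf : oovMerge (t :: ts) vs
              = oovMerge (ts.dropWhile (fun x => x == t)) (v :: w) := by
            rw [oovMerge]; simp only [hv]; rw [if_pos hvt]
          rw [hunf]
          rw [hv] at hpw hmem hvs'sub hvs_mem_ge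
          have htv : t ∈ vs := hvs'sub t (by rw [← hvt]; simp [hvt])
          refine ⟨hpw, fun x => ?_⟩
          rw [hmem x]
          constructor
          · rintro ⟨hx, hnv⟩
            exact ⟨List.mem_cons_of_mem _ (hts'sub x hx),
              fun hxv => hnv ((hvs_mem_ge x (le_of_lt (hts'gt x hx))).mp hxv)⟩
          · rintro ⟨hx, hnv⟩
            rcases List.mem_cons.mp hx with rfl | hx
            · exact absurd htv hnv
            · rcases hts_mem x hx with rfl | hx'
              · exact absurd htv hnv
              · exact ⟨hx', fun hxv => hnv (hvs'sub x hxv)⟩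
        · have hunf : oovMerge (t :: ts) vs
              = t :: oovMerge (ts.dropWhile (fun x => x == t)) (v :: w) := by
            rw [oovMerge]; simp only [hv]; rw [if_neg hvt]
          rw [hunf]
          rw [hv] at step hvs'sorted
          refine step ?_
          intro hx
          have hvge : t ≤ v := by
            have hne : ¬ (decide (v < t)) = true := by
              have := List.head?_dropWhile_not (fun v => decide (v < t)) vs
              rw [hv] at this; simpa using this
            simpa using hne
          have hvlt : t < v := lt_of_le_of_ne hvge (Ne.symm hvt)
          rcases List.mem_cons.mp hx with rfl | hx
          · exact absurd rfl hvt
          · have hle : v ≤ t := (List.pairwise_cons.mp hvs'sorted).1 t hx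
            exact absurd (lt_of_lt_of_le hvlt hle) (lt_irrefl t)
-- ===== VERDICT (by name: the statement is the Claim_ definition above) =====
theorem extract_oov_words_spec : Claim_equal_extract_oov_words := by
  intro vocab td key _
  unfold Spec_extract_oov_words extract_oov_words extract_oov_words_alt
  show PySem.List.sorted (pvOuterA vocab key td PySem.Set.empty) (fun x => x) false
      = oovMerge (PySem.List.sorted (pvOuterB key td []) (fun x => x) false)
          (PySem.List.sorted (PySem.Set.ofList vocab) (fun x => x) false)
  rw [pvOuterB_eq key td []]
  simp only [List.nil_append]
  set ts := PySem.List.sorted (pvToks key td) (fun x => x) false with hts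
  set vs := PySem.List.sorted (PySem.Set.ofList vocab) (fun x => x) false with hvs
  have hts_sorted : ts.Pairwise (· ≤ ·) := by
    have := PySem.List.sorted_pairwise (pvToks key td) (fun x => x)
    simpa using this
  have hvs_sorted : vs.Pairwise (· ≤ ·) := by
    have := PySem.List.sorted_pairwise (PySem.Set.ofList vocab) (fun x => x)
    simpa using this
  obtain ⟨hpw, hmem⟩ := oovMerge_spec ts.length ts vs le_rfl hts_sorted hvs_sorted
  have hmem' : ∀ x, x ∈ oovMerge ts vs ↔ x ∈ pvOuterA vocab key td PySem.Set.empty := by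
    intro x
    rw [hmem x, pvOuterA_mem]
    rw [hts, PySem.List.mem_sorted, hvs, PySem.List.mem_sorted, PySem.Set.mem_ofList]
    simp [PySem.Set.empty]
  have hnodupA : (pvOuterA vocab key td PySem.Set.empty).Nodup :=
    pvOuterA_nodup vocab key td PySem.Set.empty List.nodup_nil
  have hnodupM : (oovMerge ts vs).Nodup := hpw.imp (fun h => ne_of_lt h)
  have hperm : (oovMerge ts vs).Perm (pvOuterA vocab key td PySem.Set.empty) :=
    (List.perm_ext_iff_of_nodup hnodupM hnodupA).mpr hmem'
  exact PySem.List.sorted_eq_of_perm_of_pairwise_lt _ _ (fun x => x) hperm hpw
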